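-- pv_equiv track=rewrite | github.com/elin525/ChineseChecker | gameBoard.py | get_region
-- ===== SOURCE A (Python) =====
-- def get_region(p, q):
--     regions = {
--         'red': [(-4, -1), (-4, -2), (-4, -3), (-4, -4),
--                 (-3, -2), (-3, -3), (-3, -4),
--                 (-2, -3), (-2, -4),
--                 (-1, -4)],
--
--         'blue': [(1, 4), (2, 4), (3, 4), (4, 4),
--                  (2, 3), (3, 3), (4, 3),
--                  (3, 2), (4, 2),
--                  (4, 1)],
--
--         'green': [(-1, 5), (-2, 5), (-2, 6),
--                   (-3, 5), (-3, 6), (-3, 7),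
--                   (-4, 5), (-4, 6), (-4, 7), (-4, 8)],
--
--         'yellow': [(1, -5), (2, -5), (2, -6),
--                     (3, -5), (3, -6), (3, -7),
--                     (4, -5), (4, -6), (4, -7), (4, -8)],
--
--         'purple': [(-8, 4), (-7, 4), (-6, 4), (-5, 4),
--                     (-7, 3), (-6, 3), (-5, 3),
--                     (-6, 2), (-5, 2),
--                     (-5, 1)],
--
--         'orange': [(5, -1), (5, -2), (6, -2),
--                    (5, -3), (6, -3), (7, -3),
--                    (5, -4), (6, -4), (7, -4), (8, -4)],
--     }
--
--     for region, coords in regions.items():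
--         if (p, q) in coords:
--             return region
--     return 'center'
-- ===== SOURCE B (Python) =====
-- # B: no coordinate tables at all -- each region is a triangle of the star board,
-- # characterized in closed form by a coordinate box plus a diagonal bound on p+q.
-- def get_region(p, q):
--     s = p + q
--     if -4 <= p <= -1 and -4 <= q <= -1 and s <= -5:
--         return 'red'
--     if 1 <= p <= 4 and 1 <= q <= 4 and s >= 5:
--         return 'blue'
--     if -4 <= p <= -1 and 5 <= q <= 8 and s <= 4:
--         return 'green'
--     if 1 <= p <= 4 and -8 <= q <= -5 and s >= -4:
--         return 'yellow'
--     if -8 <= p <= -5 and 1 <= q <= 4 and s >= -4: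
--         return 'purple'
--     if 5 <= p <= 8 and -4 <= q <= -1 and s <= 4:
--         return 'orange'
--     return 'center'
-- ===== Notes on version B (the rewrite author's own statement) =====
-- stated objective: alternative
-- what changed: A scans six literal coordinate lists in a loop; B stores no coordinates at all and classifies (p, q) by closed-form geometry: each region is a triangle given by a coordinate box plus a diagonal bound on p+q, so B is a chain of arithmetic comparisons (correct because the six triangles are disjoint and exactly cover A's lists).
import Mathlib
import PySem

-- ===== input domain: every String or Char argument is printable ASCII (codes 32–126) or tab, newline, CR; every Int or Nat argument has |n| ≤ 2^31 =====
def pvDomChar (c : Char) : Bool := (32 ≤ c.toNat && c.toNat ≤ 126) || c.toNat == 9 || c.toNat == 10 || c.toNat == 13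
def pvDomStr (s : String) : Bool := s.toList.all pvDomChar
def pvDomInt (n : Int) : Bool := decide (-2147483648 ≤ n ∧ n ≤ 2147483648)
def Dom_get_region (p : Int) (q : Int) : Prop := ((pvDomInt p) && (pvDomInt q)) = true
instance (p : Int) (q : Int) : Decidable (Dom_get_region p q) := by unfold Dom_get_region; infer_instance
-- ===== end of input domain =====

-- B drops A's coordinate tables entirely: each region is a triangle of the star board,
-- classified by a box plus a diagonal bound on p+q (objective: alternative).

-- ===== PORT A =====
-- the dict literal 'regions' of A, as an insertion-ordered association list (its .items())
def pvRegionsA : List (String × List (Int × Int)) :=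
  [("red", [(-4, -1), (-4, -2), (-4, -3), (-4, -4), (-3, -2), (-3, -3), (-3, -4), (-2, -3), (-2, -4), (-1, -4)]),
   ("blue", [(1, 4), (2, 4), (3, 4), (4, 4), (2, 3), (3, 3), (4, 3), (3, 2), (4, 2), (4, 1)]),
   ("green", [(-1, 5), (-2, 5), (-2, 6), (-3, 5), (-3, 6), (-3, 7), (-4, 5), (-4, 6), (-4, 7), (-4, 8)]),
   ("yellow", [(1, -5), (2, -5), (2, -6), (3, -5), (3, -6), (3, -7), (4, -5), (4, -6), (4, -7), (4, -8)]),
   ("purple", [(-8, 4), (-7, 4), (-6, 4), (-5, 4), (-7, 3), (-6, 3), (-5, 3), (-6, 2), (-5, 2), (-5, 1)]),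
   ("orange", [(5, -1), (5, -2), (6, -2), (5, -3), (6, -3), (7, -3), (5, -4), (6, -4), (7, -4), (8, -4)])]

-- the 'for region, coords in regions.items(): if (p, q) in coords: return region' loop
def pvRegionLoop (p q : Int) : List (String × List (Int × Int)) → String
  | [] => "center"
  | (region, coords) :: rest =>
      if (p, q) ∈ coords then region else pvRegionLoop p q rest

def get_region (p : Int) (q : Int) : String := pvRegionLoop p q pvRegionsA

-- ===== PORT B =====
def get_region_alt (p : Int) (q : Int) : String :=
  let s := p + q
  if -4 ≤ p ∧ p ≤ -1 ∧ -4 ≤ q ∧ q ≤ -1 ∧ s ≤ -5 then "red"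
  else if 1 ≤ p ∧ p ≤ 4 ∧ 1 ≤ q ∧ q ≤ 4 ∧ 5 ≤ s then "blue"
  else if -4 ≤ p ∧ p ≤ -1 ∧ 5 ≤ q ∧ q ≤ 8 ∧ s ≤ 4 then "green"
  else if 1 ≤ p ∧ p ≤ 4 ∧ -8 ≤ q ∧ q ≤ -5 ∧ -4 ≤ s then "yellow"
  else if -8 ≤ p ∧ p ≤ -5 ∧ 1 ≤ q ∧ q ≤ 4 ∧ -4 ≤ s then "purple"
  else if 5 ≤ p ∧ p ≤ 8 ∧ -4 ≤ q ∧ q ≤ -1 ∧ s ≤ 4 then "orange"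
  else "center"

-- ===== PRECONDITION & SPEC =====
def Spec_get_region (p : Int) (q : Int) (out : String) : Prop := out = get_region_alt p q
instance (p : Int) (q : Int) (out : String) : Decidable (Spec_get_region p q out) := by unfold Spec_get_region; infer_instance

-- ===== CLAIM =====
def Claim_equal_get_region : Prop := ∀ (p : Int) (q : Int), Dom_get_region p q → Spec_get_region p q (get_region p q)

-- ===== LEMMAS AND PROOFS =====

set_option maxHeartbeats 2000000
set_option maxRecDepth 8000

-- outside the box [-8,8]², A's loop matches no coordinate and B's conditions all fail
lemma get_region_center_of_far (p q : Int)
    (h : ¬ (-8 ≤ p ∧ p ≤ 8 ∧ -8 ≤ q ∧ q ≤ 8)) :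
    get_region p q = "center" ∧ get_region_alt p q = "center" := by
  refine ⟨?_, ?_⟩
  · simp only [get_region, pvRegionsA, pvRegionLoop, List.mem_cons, List.not_mem_nil,
      Prod.mk.injEq, or_false]
    rw [if_neg (by omega), if_neg (by omega), if_neg (by omega),
        if_neg (by omega), if_neg (by omega), if_neg (by omega)]
  · simp only [get_region_alt]
    rw [if_neg (by omega), if_neg (by omega), if_neg (by omega),
        if_neg (by omega), if_neg (by omega), if_neg (by omega)]

-- inside the box both sides agree, checked exhaustively
lemma get_region_eq_alt_near : ∀ (i j : Fin 17),
    get_region ((i : Int) - 8) ((j : Int) - 8) = get_region_alt ((i : Int) - 8) ((j : Int) - 8) := by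
  decide

-- ===== VERDICT =====
theorem get_region_spec : Claim_equal_get_region := by
  intro p q _
  unfold Spec_get_region
  by_cases h : -8 ≤ p ∧ p ≤ 8 ∧ -8 ≤ q ∧ q ≤ 8
  · have := get_region_eq_alt_near ⟨(p + 8).toNat, by omega⟩ ⟨(q + 8).toNat, by omega⟩
    simpa only [Fin.val_mk, Int.toNat_of_nonneg (show (0:Int) ≤ p + 8 by omega),
      Int.toNat_of_nonneg (show (0:Int) ≤ q + 8 by omega), add_sub_cancel_right] using this
  · have hc := get_region_center_of_far p q h
    rw [hc.1, hc.2]
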